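-- pv_equiv track=rewrite | github.com/pypi-data/pypi-mirror-397 | packages/vibe-checkr/vibe_checkr-0.1.0.tar.gz/vibe_checkr-0.1.0/vibe/lock/generator.py | _infer_semantic_names
-- ===== SOURCE A (Python) =====
-- def _infer_semantic_names(palette: list[str]) -> dict[str, str]:
--     """Infer semantic names for colors based on common patterns."""
--     names: dict[str, str] = {}
--
--     # Common semantic mappings
--     semantic_patterns = {
--         "blue": "primary",
--         "indigo": "primary",
--         "violet": "primary",
--         "gray": "neutral",
--         "slate": "neutral",
--         "zinc": "neutral",
--         "neutral": "neutral",
--         "red": "danger",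
--         "green": "success",
--         "emerald": "success",
--         "yellow": "warning",
--         "amber": "warning",
--         "orange": "accent",
--     }
--
--     used_names: set[str] = set()
--
--     for color in palette:
--         # Check for base color match
--         for base, semantic in semantic_patterns.items():
--             if color.startswith(base):
--                 # Add number suffix if name already used
--                 name = semantic
--                 counter = 1
--                 while name in used_names:
--                     counter += 1
--                     name = f"{semantic}-{counter}"
--
--                 names[color] = name
--                 used_names.add(name)
--                 break
--
--         # Handle special cases
--         if color == "white":
--             names[color] = "background"
--             used_names.add("background")
--         elif color == "black":
--             names[color] = "foreground"
--             used_names.add("foreground")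
--
--     return names
-- ===== SOURCE B (Python) =====
-- def _infer_semantic_names(palette: list[str]) -> dict[str, str]:
--     """Infer semantic names: group positions by semantic, then number each group."""
--     patterns = [
--         ("blue", "primary"), ("indigo", "primary"), ("violet", "primary"),
--         ("gray", "neutral"), ("slate", "neutral"), ("zinc", "neutral"),
--         ("neutral", "neutral"), ("red", "danger"), ("green", "success"),
--         ("emerald", "success"), ("yellow", "warning"), ("amber", "warning"),
--         ("orange", "accent"),
--     ]
--     # pass 1: collect the positions of each semantic group, in palette order
--     groups: dict[str, list[int]] = {}
--     for i, color in enumerate(palette):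
--         for base, sem in patterns:
--             if color.startswith(base):
--                 groups.setdefault(sem, []).append(i)
--                 break
--     # pass 2: number the members of each group: first bare, then sem-2, sem-3, ...
--     rank: dict[int, str] = {}
--     for sem, positions in groups.items():
--         for k, i in enumerate(positions):
--             rank[i] = sem if k == 0 else f"{sem}-{k + 1}"
--     # pass 3: assemble (dict overwrite gives last-occurrence value, first-occurrence position)
--     result: dict[str, str] = {}
--     for i, color in enumerate(palette):
--         if color == "white":
--             result[color] = "background"
--         elif color == "black":
--             result[color] = "foreground"
--         elif i in rank:
--             result[color] = rank[i]
--     return result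
-- ===== Notes on version B (the rewrite author's own statement) =====
-- stated objective: alternative
-- what changed: A streams over the palette once, retrying candidate names (semantic, semantic-2, ...) against a growing used-name set per color; B instead classifies positions, collects each semantic group's positions in palette order, numbers each group directly (first bare, i-th 'sem-i'), and assembles the result in a final pass, with no used-name set and no retry loop.
import Mathlib
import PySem

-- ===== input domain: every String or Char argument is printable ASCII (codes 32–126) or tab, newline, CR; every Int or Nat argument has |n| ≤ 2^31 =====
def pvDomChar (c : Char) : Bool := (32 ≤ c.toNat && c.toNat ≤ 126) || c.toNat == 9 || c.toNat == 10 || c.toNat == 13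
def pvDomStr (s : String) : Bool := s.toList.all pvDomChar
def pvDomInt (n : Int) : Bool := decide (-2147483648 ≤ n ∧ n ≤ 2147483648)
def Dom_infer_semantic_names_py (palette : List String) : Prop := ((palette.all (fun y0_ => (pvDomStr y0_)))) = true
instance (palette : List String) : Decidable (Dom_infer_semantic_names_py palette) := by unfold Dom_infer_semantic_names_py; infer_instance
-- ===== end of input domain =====

-- B replaces A's per-color retry loop over a used-name set by a grouping pass (classify each
-- position, number each semantic group in order) of similar cost: objective 'alternative'.

-- ===== PORT A =====
-- semantic_patterns: a dict iterated via .items() — ported as its insertion-ordered pair list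
def pvPatternsA : List (String × String) :=
  [("blue","primary"),("indigo","primary"),("violet","primary"),
   ("gray","neutral"),("slate","neutral"),("zinc","neutral"),
   ("neutral","neutral"),("red","danger"),("green","success"),
   ("emerald","success"),("yellow","warning"),("amber","warning"),
   ("orange","accent")]

-- 'for base, semantic in semantic_patterns.items(): if color.startswith(base): … break'
def pvFindPattern (color : String) : List (String × String) → Option String
  | [] => none
  | (base, sem) :: rest =>
    if PySem.Str.startswith color base then some sem else pvFindPattern color rest

-- 'counter = 1; while name in used_names: counter += 1; name = f"{semantic}-{counter}"'
-- (fuel |used|+1 only makes the loop total: the probed names are distinct, so it always suffices)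
def pvProbe (used : PySem.Set String) (semantic : String) :
    Nat → String → Int → String
  | 0, name, _ => name
  | fuel + 1, name, counter =>
    if PySem.Set.contains used name then
      pvProbe used semantic fuel (semantic ++ "-" ++ PySem.Int.toStr (counter + 1)) (counter + 1)
    else name

-- one iteration of 'for color in palette' (state: names, used_names)
def pvStepA (st : PySem.Dict String String × PySem.Set String) (color : String) :
    PySem.Dict String String × PySem.Set String :=
  let st1 := match pvFindPattern color pvPatternsA with
    | some semantic =>
        let name := pvProbe st.2 semantic (st.2.length + 1) semantic 1
        (st.1.insert color name, PySem.Set.add st.2 name)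
    | none => st
  if color = "white" then (st1.1.insert color "background", PySem.Set.add st1.2 "background")
  else if color = "black" then (st1.1.insert color "foreground", PySem.Set.add st1.2 "foreground")
  else st1

def infer_semantic_names_py (palette : List String) : List (String × String) :=
  (palette.foldl pvStepA (PySem.Dict.empty, PySem.Set.empty)).1.items

-- ===== PORT B =====
def pvPatternsB : List (String × String) :=
  [("blue","primary"),("indigo","primary"),("violet","primary"),
   ("gray","neutral"),("slate","neutral"),("zinc","neutral"),
   ("neutral","neutral"),("red","danger"),("green","success"),
   ("emerald","success"),("yellow","warning"),("amber","warning"),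
   ("orange","accent")]

def pvSemanticsB : List String := ["primary","neutral","danger","success","warning","accent"]

-- B's classify(color): first pattern whose base prefixes color
def pvClassifyB (color : String) : List (String × String) → Option String
  | [] => none
  | (base, sem) :: rest =>
    if PySem.Str.startswith color base then some sem else pvClassifyB color rest

def infer_semantic_names_py_alt (palette : List String) : List (String × String) :=
  let kinds := palette.map (fun c => pvClassifyB c pvPatternsB)
  let rank : PySem.Dict Int String :=
    pvSemanticsB.foldl (fun r sem =>
      let group := ((PySem.List.enumerate kinds 0).filter (fun p => p.2 == some sem)).map (fun p => p.1)
      (PySem.List.enumerate group 0).foldl (fun r q =>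
        r.insert q.2 (if q.1 == 0 then sem else sem ++ "-" ++ PySem.Int.toStr (q.1 + 1))) r)
      PySem.Dict.empty
  ((PySem.List.enumerate palette 0).foldl (fun res p =>
      if p.2 == "white" then res.insert p.2 "background"
      else if p.2 == "black" then res.insert p.2 "foreground"
      else match rank.get? p.1 with
        | some nm => res.insert p.2 nm
        | none => res)
    PySem.Dict.empty).items

-- ===== PRECONDITION & SPEC =====
def Spec_infer_semantic_names_py (palette : List String) (out : List (String × String)) : Prop := out = infer_semantic_names_py_alt palette
instance (palette : List String) (out : List (String × String)) : Decidable (Spec_infer_semantic_names_py palette out) := by unfold Spec_infer_semantic_names_py; infer_instance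

-- ===== CLAIM (what is proved, stated in full; the proofs are below) =====
def Claim_equal_infer_semantic_names_py : Prop := ∀ (palette : List String), Dom_infer_semantic_names_py palette → Spec_infer_semantic_names_py palette (infer_semantic_names_py palette)

-- ===== LEMMAS AND PROOFS =====

-- ---- decimal-string machinery: str(n) is injective on Nat ----
def pvDec (l : List Char) : Nat := l.foldl (fun a c => 10 * a + (c.toNat - 48)) 0

lemma pvDigitChar_toNat {k : Nat} (h : k < 10) : (Nat.digitChar k).toNat = 48 + k := by
  interval_cases k <;> rfl

lemma pvToDigitsCore_append (f : Nat) : ∀ (n : Nat) (acc : List Char),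
    Nat.toDigitsCore 10 f n acc = Nat.toDigitsCore 10 f n [] ++ acc := by
  induction f with
  | zero => intro n acc; simp [Nat.toDigitsCore]
  | succ f ih =>
    intro n acc
    simp only [Nat.toDigitsCore]
    by_cases h : n / 10 = 0
    · simp [h]
    · simp only [h, if_false]
      rw [ih (n / 10) (Nat.digitChar (n % 10) :: acc), ih (n / 10) [Nat.digitChar (n % 10)]]
      simp

lemma pvDec_toDigitsCore (f : Nat) : ∀ n, n < 10 ^ f → pvDec (Nat.toDigitsCore 10 f n []) = n := by
  induction f with
  | zero => intro n h; interval_cases n; rfl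
  | succ f ih =>
    intro n h
    simp only [Nat.toDigitsCore]
    by_cases h0 : n / 10 = 0
    · have hn : n < 10 := by omega
      have hmod : n % 10 = n := by omega
      simp [h0, pvDec, hmod, pvDigitChar_toNat hn]
    · simp only [h0, if_false]
      rw [pvToDigitsCore_append]
      have hdiv : n / 10 < 10 ^ f := by
        have h' : n < 10 ^ f * 10 := by rw [← pow_succ]; exact h
        omega
      simp only [pvDec, List.foldl_append]
      have := ih (n / 10) hdiv
      simp only [pvDec] at this
      rw [this]
      simp [pvDigitChar_toNat (show n % 10 < 10 by omega)]
      omega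

lemma pvToDigits_inj {m n : Nat} (h : Nat.toDigits 10 m = Nat.toDigits 10 n) : m = n := by
  have hb : (1 : Nat) < 10 := by norm_num
  have hm : m < 10 ^ (m + 1) := lt_trans (Nat.lt_succ_self m) (Nat.lt_pow_self hb)
  have hn : n < 10 ^ (n + 1) := lt_trans (Nat.lt_succ_self n) (Nat.lt_pow_self hb)
  have h' := congrArg pvDec h
  unfold Nat.toDigits at h'
  rw [pvDec_toDigitsCore (m + 1) m hm, pvDec_toDigitsCore (n + 1) n hn] at h'
  exact h'

lemma pvToChars_natCast (j : Nat) : PySem.Int.toChars (j : Int) = Nat.toDigits 10 j := by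
  have : ¬ ((j : Int) < 0) := by omega
  simp [PySem.Int.toChars, this]

-- ---- the names A and B build: pvName s j (j ≥ 1) ----
def pvSems : List String := ["primary","neutral","danger","success","warning","accent"]
def pvTags : List String := pvSems ++ ["background","foreground"]

def pvName (sem : String) (j : Nat) : String :=
  if j ≤ 1 then sem else sem ++ "-" ++ PySem.Int.toStr (j : Int)

lemma pvName_one (sem : String) : pvName sem 1 = sem := by simp [pvName]

lemma pvName_toList {sem : String} {j : Nat} (h : 2 ≤ j) :
    (pvName sem j).toList = sem.toList ++ '-' :: Nat.toDigits 10 j := by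
  have h1 : ¬ (j ≤ 1) := by omega
  simp [pvName, h1, String.toList_append, PySem.Int.toList_toStr, pvToChars_natCast]

lemma pvName_inj {sem : String} {j k : Nat} (hj : 1 ≤ j) (hk : 1 ≤ k)
    (h : pvName sem j = pvName sem k) : j = k := by
  have htl := congrArg String.toList h
  rcases Nat.lt_or_ge j 2 with hj2 | hj2 <;> rcases Nat.lt_or_ge k 2 with hk2 | hk2
  · omega
  · exfalso
    have hj1 : j = 1 := by omega
    subst hj1
    rw [pvName_one, pvName_toList hk2] at htl
    have := congrArg List.length htl
    simp at this
  · exfalso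
    have hk1 : k = 1 := by omega
    subst hk1
    rw [pvName_one, pvName_toList hj2] at htl
    have := congrArg List.length htl
    simp at this
  · rw [pvName_toList hj2, pvName_toList hk2] at htl
    have h2 := List.append_cancel_left htl
    injection h2 with _ h3
    exact pvToDigits_inj h3

lemma pvHead_ne_imp {a b : String} (h : a.toList.head? ≠ b.toList.head?) : a ≠ b :=
  fun e => h (by rw [e])

lemma pvName_head {sem : String} (hne : sem.toList ≠ []) (j : Nat) :
    (pvName sem j).toList.head? = sem.toList.head? := by
  rcases Nat.lt_or_ge j 2 with h | h
  · have : j ≤ 1 := by omega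
    simp [pvName, this]
  · rw [pvName_toList h]
    cases htl : sem.toList with
    | nil => exact absurd htl hne
    | cons a t => simp

lemma pvTags_heads : ∀ s ∈ pvTags, ∀ t ∈ pvTags, s ≠ t → s.toList.head? ≠ t.toList.head? := by decide
lemma pvTags_ne_nil : ∀ s ∈ pvTags, s.toList ≠ [] := by decide
lemma pvSems_ne_bg : ∀ s ∈ pvSems, s ≠ "background" ∧ s ≠ "foreground" := by decide
lemma pvBg_mem : "background" ∈ pvTags := by decide
lemma pvFg_mem : "foreground" ∈ pvTags := by decide

lemma pvName_ne_of_ne {s t : String} (hs : s ∈ pvTags) (ht : t ∈ pvTags) (hst : s ≠ t)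
    (j k : Nat) : pvName s j ≠ pvName t k := by
  apply pvHead_ne_imp
  rw [pvName_head (pvTags_ne_nil s hs) j, pvName_head (pvTags_ne_nil t ht) k]
  exact pvTags_heads s hs t ht hst

-- ---- classification ----
def pvCls (c : String) : Option String := pvFindPattern c pvPatternsA

lemma pvFindPattern_mem {c : String} {s : String} : ∀ {l : List (String × String)},
    pvFindPattern c l = some s → s ∈ l.map Prod.snd := by
  intro l
  induction l with
  | nil => intro h; simp [pvFindPattern] at h
  | cons p rest ih =>
    rcases p with ⟨base, sem⟩
    intro h
    simp only [pvFindPattern] at h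
    by_cases hb : PySem.Str.startswith c base
    · rw [if_pos hb] at h
      injection h with h
      simp [h]
    · rw [if_neg hb] at h
      simpa using Or.inr (ih h)

lemma pvCls_mem {c s : String} (h : pvCls c = some s) : s ∈ pvSems := by
  have h2 := pvFindPattern_mem (l := pvPatternsA) h
  simp [pvPatternsA] at h2
  rcases h2 with rfl | rfl | rfl | rfl | rfl | rfl <;> decide

lemma pvCls_white : pvCls "white" = none := by decide
lemma pvCls_black : pvCls "black" = none := by decide

-- ---- the common streamed reference computation ----
def pvBump (cnt : String → Nat) (s : String) : String → Nat :=
  fun x => if x = s then cnt s + 1 else cnt x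

def pvSpecGo : List String → (String → Nat) → PySem.Dict String String → PySem.Dict String String
  | [], _, d => d
  | c :: t, cnt, d =>
    match pvCls c with
    | some s => pvSpecGo t (pvBump cnt s) (d.insert c (pvName s (cnt s + 1)))
    | none =>
      if c = "white" then pvSpecGo t cnt (d.insert c "background")
      else if c = "black" then pvSpecGo t cnt (d.insert c "foreground")
      else pvSpecGo t cnt d


lemma pvSpecGo_some {c s : String} {t : List String} {cnt : String → Nat}
    {d : PySem.Dict String String} (h : pvCls c = some s) :
    pvSpecGo (c :: t) cnt d = pvSpecGo t (pvBump cnt s) (d.insert c (pvName s (cnt s + 1))) := by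
  conv_lhs => simp only [pvSpecGo]
  rw [h]

lemma pvSpecGo_none {c : String} {t : List String} {cnt : String → Nat}
    {d : PySem.Dict String String} (h : pvCls c = none) :
    pvSpecGo (c :: t) cnt d =
      (if c = "white" then pvSpecGo t cnt (d.insert c "background")
       else if c = "black" then pvSpecGo t cnt (d.insert c "foreground")
       else pvSpecGo t cnt d) := by
  conv_lhs => simp only [pvSpecGo]
  rw [h]

-- ---- A-side: invariant on used_names ----
def pvInv (used : List String) (cnt : String → Nat) : Prop :=
  used.Nodup ∧
  (∀ x ∈ used, (∃ s ∈ pvSems, ∃ j, 1 ≤ j ∧ j ≤ cnt s ∧ x = pvName s j) ∨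
      x = "background" ∨ x = "foreground") ∧
  (∀ s ∈ pvSems, ∀ j, 1 ≤ j → j ≤ cnt s → pvName s j ∈ used)

lemma pvFresh {used : List String} {cnt : String → Nat} (hInv : pvInv used cnt)
    {s : String} (hs : s ∈ pvSems) {j : Nat} (hj : cnt s + 1 ≤ j) : pvName s j ∉ used := by
  intro hmem
  obtain ⟨-, hchar, -⟩ := hInv
  rcases hchar _ hmem with ⟨t, ht, k, hk1, hk2, he⟩ | he | he
  · by_cases hst : s = t
    · subst hst
      have := pvName_inj (by omega) hk1 he
      omega
    · exact pvName_ne_of_ne (List.mem_append_left _ hs) (List.mem_append_left _ ht) hst j k he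
  · exact pvName_ne_of_ne (List.mem_append_left _ hs) pvBg_mem (pvSems_ne_bg s hs).1 j 1
      (by rw [he, pvName_one])
  · exact pvName_ne_of_ne (List.mem_append_left _ hs) pvFg_mem (pvSems_ne_bg s hs).2 j 1
      (by rw [he, pvName_one])

lemma pvCnt_le {used : List String} {cnt : String → Nat} (hInv : pvInv used cnt)
    {s : String} (hs : s ∈ pvSems) : cnt s ≤ used.length := by
  have hsub : ((List.range (cnt s)).map (fun k => pvName s (k + 1))) ⊆ used := by
    intro x hx
    simp only [List.mem_map, List.mem_range] at hx
    obtain ⟨k, hk, rfl⟩ := hx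
    exact hInv.2.2 s hs (k + 1) (by omega) (by omega)
  have hnd : ((List.range (cnt s)).map (fun k => pvName s (k + 1))).Nodup := by
    refine List.Nodup.map_on ?_ List.nodup_range
    intro a _ b _ he
    have := pvName_inj (by omega) (by omega) he
    omega
  have := (List.subperm_of_subset hnd hsub).length_le
  simpa using this

lemma pvProbe_spec {used : PySem.Set String} {cnt : String → Nat} {s : String}
    (hInv : pvInv used cnt) (hs : s ∈ pvSems) :
    ∀ (fuel counter : Nat), 1 ≤ counter → counter ≤ cnt s + 1 → cnt s + 2 - counter ≤ fuel →
      pvProbe used s fuel (pvName s counter) (counter : Int) = pvName s (cnt s + 1) := by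
  intro fuel
  induction fuel with
  | zero => intro counter h1 h2 h3; omega
  | succ fuel ih =>
    intro counter h1 h2 h3
    simp only [pvProbe]
    by_cases hle : counter ≤ cnt s
    · have hmem : pvName s counter ∈ used := hInv.2.2 s hs counter h1 hle
      rw [if_pos ((PySem.Set.contains_iff _ _).mpr hmem)]
      have hcast : (counter : Int) + 1 = ((counter + 1 : Nat) : Int) := by push_cast; ring
      have hbuild : s ++ "-" ++ PySem.Int.toStr ((counter : Int) + 1) = pvName s (counter + 1) := by
        rw [hcast]
        simp [pvName, show ¬ (counter + 1 ≤ 1) by omega]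
      rw [hbuild, hcast]
      exact ih (counter + 1) (by omega) (by omega) (by omega)
    · have hc : counter = cnt s + 1 := by omega
      subst hc
      have hnotmem := pvFresh hInv hs (le_refl (cnt s + 1))
      rw [if_neg (by simp only [PySem.Set.contains_iff]; exact hnotmem)]

lemma pvBump_ge (cnt : String → Nat) (s t : String) : cnt t ≤ pvBump cnt s t := by
  by_cases h : t = s
  · subst h; simp [pvBump]
  · simp [pvBump, h]

lemma pvInv_nil : pvInv PySem.Set.empty (fun _ => 0) := by
  refine ⟨List.nodup_nil, ?_, ?_⟩
  · intro x hx; simp [PySem.Set.empty] at hx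
  · intro s _ j h1 h2; simp at h2; omega

lemma pvInv_add {used : List String} {cnt : String → Nat} {s : String}
    (hInv : pvInv used cnt) (hs : s ∈ pvSems) :
    pvInv (PySem.Set.add used (pvName s (cnt s + 1))) (pvBump cnt s) := by
  have hnot := pvFresh hInv hs (le_refl (cnt s + 1))
  rw [PySem.Set.add_of_not_mem hnot]
  obtain ⟨hnd, hchar, hmem⟩ := hInv
  refine ⟨?_, ?_, ?_⟩
  · rw [List.nodup_append]
    refine ⟨hnd, List.nodup_singleton _, ?_⟩
    intro a ha b hbmem
    simp only [List.mem_singleton] at hbmem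
    subst hbmem
    exact fun h' => hnot (h' ▸ ha)
  · intro x hx
    rcases List.mem_append.mp hx with hx | hx
    · rcases hchar x hx with ⟨t, ht, j, hj1, hj2, he⟩ | he | he
      · exact Or.inl ⟨t, ht, j, hj1, le_trans hj2 (pvBump_ge cnt s t), he⟩
      · exact Or.inr (Or.inl he)
      · exact Or.inr (Or.inr he)
    · simp only [List.mem_singleton] at hx
      subst hx
      exact Or.inl ⟨s, hs, cnt s + 1, by omega, by simp [pvBump], rfl⟩
  · intro t ht j hj1 hj2
    by_cases hts : t = s
    · subst hts
      simp [pvBump] at hj2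
      rcases Nat.lt_or_ge j (cnt t + 1) with h | h
      · exact List.mem_append_left _ (hmem t ht j hj1 (by omega))
      · have : j = cnt t + 1 := by omega
        subst this
        exact List.mem_append_right _ (by simp)
    · have he : pvBump cnt s t = cnt t := by simp [pvBump, hts]
      rw [he] at hj2
      exact List.mem_append_left _ (hmem t ht j hj1 hj2)

lemma pvInv_tag {used : List String} {cnt : String → Nat} (hInv : pvInv used cnt)
    (tag : String) (htag : tag = "background" ∨ tag = "foreground") :
    pvInv (PySem.Set.add used tag) cnt := by
  obtain ⟨hnd, hchar, hmem⟩ := hInv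
  rw [PySem.Set.add_eq_ite]
  by_cases h : tag ∈ used
  · rw [if_pos h]; exact ⟨hnd, hchar, hmem⟩
  · rw [if_neg h]
    refine ⟨?_, ?_, ?_⟩
    · rw [List.nodup_append]
      refine ⟨hnd, List.nodup_singleton _, ?_⟩
      intro a ha b hbmem
      simp only [List.mem_singleton] at hbmem
      subst hbmem
      exact fun h' => h (h' ▸ ha)
    · intro x hx
      rcases List.mem_append.mp hx with hx | hx
      · exact hchar x hx
      · simp only [List.mem_singleton] at hx
        subst hx
        rcases htag with h' | h'
        · exact Or.inr (Or.inl h')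
        · exact Or.inr (Or.inr h')
    · intro t ht j hj1 hj2
      exact List.mem_append_left _ (hmem t ht j hj1 hj2)

lemma pvA_go : ∀ (l : List String) (cnt : String → Nat) (used : PySem.Set String)
    (d : PySem.Dict String String), pvInv used cnt →
    (l.foldl pvStepA (d, used)).1 = pvSpecGo l cnt d := by
  intro l
  induction l with
  | nil => intro cnt used d _; rfl
  | cons c t ih =>
    intro cnt used d hInv
    rw [List.foldl_cons]
    rcases hcls : pvCls c with _ | s
    · -- no pattern matches
      have hcls' : pvFindPattern c pvPatternsA = none := hcls
      have hstep : pvStepA (d, used) c =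
          if c = "white" then (d.insert c "background", PySem.Set.add used "background")
          else if c = "black" then (d.insert c "foreground", PySem.Set.add used "foreground")
          else (d, used) := by
        unfold pvStepA
        rw [hcls']
      rw [hstep, pvSpecGo_none hcls]
      by_cases hw : c = "white"
      · rw [if_pos hw, if_pos hw]
        exact ih _ _ _ (pvInv_tag hInv _ (Or.inl rfl))
      · rw [if_neg hw, if_neg hw]
        by_cases hb : c = "black"
        · rw [if_pos hb, if_pos hb]
          exact ih _ _ _ (pvInv_tag hInv _ (Or.inr rfl))
        · rw [if_neg hb, if_neg hb]
          exact ih _ _ _ hInv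
    · -- pattern s matches
      have hs := pvCls_mem hcls
      have hcls' : pvFindPattern c pvPatternsA = some s := hcls
      have hw : c ≠ "white" := by
        intro h; rw [h, pvCls_white] at hcls; cases hcls
      have hb : c ≠ "black" := by
        intro h; rw [h, pvCls_black] at hcls; cases hcls
      have hprobe : pvProbe used s (used.length + 1) s 1 = pvName s (cnt s + 1) := by
        have h1 := pvProbe_spec hInv hs (used.length + 1) 1 (by omega) (by omega)
          (by have := pvCnt_le hInv hs; omega)
        rw [pvName_one] at h1
        simpa using h1
      have hstep : pvStepA (d, used) c =
          (d.insert c (pvProbe used s (used.length + 1) s 1),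
           PySem.Set.add used (pvProbe used s (used.length + 1) s 1)) := by
        unfold pvStepA
        rw [hcls', if_neg hw, if_neg hb]
      rw [hstep, hprobe, pvSpecGo_some hcls]
      exact ih _ _ _ (pvInv_add hInv hs)

-- ---- B-side ----
def pvKinds (palette : List String) : List (Option String) := palette.map (fun c => pvCls c)

def pvGroup (palette : List String) (sem : String) : List Int :=
  ((PySem.List.enumerate (pvKinds palette) 0).filter (fun p => p.2 == some sem)).map (fun p => p.1)

def pvNm (sem : String) (k : Int) : String :=
  if k == 0 then sem else sem ++ "-" ++ PySem.Int.toStr (k + 1)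

def pvChunk (palette : List String) (sem : String) : List (Int × String) :=
  (PySem.List.enumerate (pvGroup palette sem) 0).map (fun q => (q.2, pvNm sem q.1))

def pvPairs (palette : List String) : List (Int × String) :=
  pvSemanticsB.flatMap (pvChunk palette)

def pvRankF (palette : List String) : PySem.Dict Int String :=
  pvSemanticsB.foldl (fun r sem =>
    (PySem.List.enumerate (pvGroup palette sem) 0).foldl (fun r q =>
      r.insert q.2 (pvNm sem q.1)) r) PySem.Dict.empty

def pvStep3 (rank : PySem.Dict Int String) (res : PySem.Dict String String)
    (p : Int × String) : PySem.Dict String String :=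
  if p.2 == "white" then res.insert p.2 "background"
  else if p.2 == "black" then res.insert p.2 "foreground"
  else match rank.get? p.1 with
    | some nm => res.insert p.2 nm
    | none => res

def pvCount (palette : List String) (k : Nat) (s : String) : Nat :=
  ((palette.take k).filter (fun c => pvCls c == some s)).length

lemma pvClassifyB_eq (c : String) : ∀ (l : List (String × String)),
    pvClassifyB c l = pvFindPattern c l := by
  intro l
  induction l with
  | nil => rfl
  | cons p rest ih =>
    rcases p with ⟨base, sem⟩
    simp only [pvClassifyB, pvFindPattern, ih]

lemma pvPatternsB_eq : pvPatternsB = pvPatternsA := rfl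

lemma pvClsB_eq (c : String) : pvClassifyB c pvPatternsB = pvCls c := by
  rw [pvClassifyB_eq, pvPatternsB_eq]; rfl

lemma pvAlt_eq (palette : List String) : infer_semantic_names_py_alt palette =
    ((PySem.List.enumerate palette 0).foldl (pvStep3 (pvRankF palette)) PySem.Dict.empty).items := by
  unfold infer_semantic_names_py_alt pvStep3 pvRankF pvGroup pvNm pvKinds
  simp only [pvClsB_eq]

-- fold of an inner fold over f x = fold over the flatMap
lemma pvFoldl_flatMap {α β γ : Type} (l : List α) (f : α → List β) (g : γ → β → γ) (init : γ) :
    l.foldl (fun a x => (f x).foldl g a) init = (l.flatMap f).foldl g init := by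
  induction l generalizing init with
  | nil => rfl
  | cons x t ih => simp [List.foldl_append, ih]

lemma pvRankF_eq_pairs_fold (palette : List String) :
    pvRankF palette = (pvPairs palette).foldl (fun r q => r.insert q.1 q.2) PySem.Dict.empty := by
  unfold pvRankF pvPairs
  rw [← pvFoldl_flatMap]
  simp only [pvChunk, List.foldl_map]

lemma pvMem_group {palette : List String} {sem : String} {i : Int} :
    i ∈ pvGroup palette sem ↔
      ∃ k : Nat, k < palette.length ∧ i = (k : Int) ∧ pvCls (palette.getD k "") = some sem := by
  unfold pvGroup
  simp only [List.mem_map, List.mem_filter, PySem.List.mem_enumerate_iff]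
  constructor
  · rintro ⟨⟨a, b⟩, ⟨⟨k, hk, hp⟩, hq⟩, rfl⟩
    injection hp with hp1 hp2
    subst hp1; subst hp2
    simp only [pvKinds, List.length_map] at hk
    refine ⟨k, hk, by simp, ?_⟩
    simp only [pvKinds, List.getElem_map] at hq
    simp only [beq_iff_eq] at hq
    rw [List.getD_eq_getElem _ _ hk]
    exact hq
  · rintro ⟨k, hk, rfl, hc⟩
    refine ⟨((k : Int), pvCls palette[k]), ⟨⟨k, by simp [pvKinds, hk], ?_⟩, ?_⟩, rfl⟩
    · simp [pvKinds, List.getElem_map]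
    · simp only [beq_iff_eq]
      rw [List.getD_eq_getElem _ _ hk] at hc
      exact hc

lemma pvGroup_append (palette : List String) (c : String) (sem : String) :
    pvGroup (palette ++ [c]) sem =
      pvGroup palette sem ++
        (if pvCls c = some sem then [(palette.length : Int)] else []) := by
  unfold pvGroup pvKinds
  rw [List.map_append, PySem.List.enumerate_append, List.filter_append, List.map_append]
  congr 1
  simp only [List.map_cons, List.map_nil, PySem.List.enumerate_cons, PySem.List.enumerate_nil]
  by_cases h : pvCls c = some sem
  · simp [h, List.length_map]
  · have : (pvCls c == some sem) = false := by simp [h]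
    simp [this, h]

lemma pvGroup_length (palette : List String) (sem : String) :
    (pvGroup palette sem).length = pvCount palette palette.length sem := by
  unfold pvGroup pvCount pvKinds
  rw [List.take_length, List.length_map]
  rw [← List.countP_eq_length_filter, ← List.countP_eq_length_filter]
  have h1 : (PySem.List.enumerate (palette.map (fun c => pvCls c)) 0).countP
      (fun p => p.2 == some sem)
      = ((PySem.List.enumerate (palette.map (fun c => pvCls c)) 0).map
          (fun p => p.2)).countP (fun o => o == some sem) := by
    rw [List.countP_map]; rfl
  rw [h1, PySem.List.map_snd_enumerate, List.countP_map]
  rfl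

lemma pvNm_natCast (sem : String) (k : Nat) : pvNm sem (k : Int) = pvName sem (k + 1) := by
  unfold pvNm pvName
  by_cases h : k = 0
  · subst h; simp
  · have h1 : ((k : Int) == 0) = false := by simp; omega
    have h2 : ¬ (k + 1 ≤ 1) := by omega
    rw [h1]
    simp only [Bool.false_eq_true, if_false, if_neg h2]
    have : ((k : Int) + 1) = ((k + 1 : Nat) : Int) := by push_cast; ring
    rw [this]

lemma pvGetD_append_left {l1 l2 : List String} {k : Nat} (hk : k < l1.length) :
    (l1 ++ l2).getD k "" = l1.getD k "" := by
  rw [List.getD_eq_getElem?_getD, List.getD_eq_getElem?_getD, List.getElem?_append_left hk]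

lemma pvGetD_append_self (l1 : List String) (c : String) (l2 : List String) :
    (l1 ++ c :: l2).getD l1.length "" = c := by
  rw [List.getD_eq_getElem?_getD, List.getElem?_append_right (le_refl _)]
  simp

lemma pvCount_take (pre : List String) (c : String) (k : Nat) (hk : k ≤ pre.length) (s : String) :
    pvCount (pre ++ [c]) k s = pvCount pre k s := by
  unfold pvCount
  rw [List.take_append_of_le_length hk]

lemma pvMem_pairs : ∀ (palette : List String) (i : Int) (v : String),
    (i, v) ∈ pvPairs palette ↔
      ∃ k : Nat, k < palette.length ∧ i = (k : Int) ∧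
        ∃ s, pvCls (palette.getD k "") = some s ∧ v = pvName s (pvCount palette k s + 1) := by
  intro palette
  induction palette using List.reverseRecOn with
  | nil =>
    intro i v
    constructor
    · intro h
      simp only [pvPairs, List.mem_flatMap] at h
      obtain ⟨sem, _, hmem⟩ := h
      simp [pvChunk, pvGroup, pvKinds, PySem.List.enumerate_nil] at hmem
    · rintro ⟨k, hk, _⟩
      simp at hk
  | append_singleton pre c ih =>
    intro i v
    have hchunk : ∀ sem, pvChunk (pre ++ [c]) sem = pvChunk pre sem ++
        (if pvCls c = some sem then
          [((pre.length : Int), pvNm sem ((pvGroup pre sem).length : Int))] else []) := by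
      intro sem
      unfold pvChunk
      rw [pvGroup_append]
      by_cases h : pvCls c = some sem
      · rw [if_pos h, if_pos h, PySem.List.enumerate_append]
        simp [PySem.List.enumerate_cons, PySem.List.enumerate_nil]
      · rw [if_neg h, if_neg h]
        simp
    constructor
    · intro hm
      simp only [pvPairs, List.mem_flatMap] at hm
      obtain ⟨sem, hsem, hmem⟩ := hm
      rw [hchunk sem] at hmem
      rcases List.mem_append.mp hmem with hmem | hmem
      · have := (ih i v).mp (by simp only [pvPairs, List.mem_flatMap]; exact ⟨sem, hsem, hmem⟩)
        obtain ⟨k, hk, hik, s, hcs, hv⟩ := this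
        refine ⟨k, by simp; omega, hik, s, ?_, ?_⟩
        · rw [pvGetD_append_left hk]
          exact hcs
        · rw [pvCount_take pre c k (by omega) s]
          exact hv
      · by_cases h : pvCls c = some sem
        · rw [if_pos h] at hmem
          simp only [List.mem_singleton] at hmem
          injection hmem with h1 h2
          subst h1; subst h2
          refine ⟨pre.length, by simp, rfl, sem, ?_, ?_⟩
          · rw [pvGetD_append_self]
            exact h
          · rw [pvNm_natCast, pvGroup_length, pvCount_take pre c pre.length (le_refl _) sem]
        · rw [if_neg h] at hmem
          simp at hmem
    · rintro ⟨k, hk, rfl, s, hcs, hv⟩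
      simp only [List.length_append, List.length_singleton] at hk
      by_cases hkl : k < pre.length
      · -- the old part: use ih
        have hget : (pre ++ [c]).getD k "" = pre.getD k "" := pvGetD_append_left hkl
        rw [hget] at hcs
        rw [pvCount_take pre c k (by omega) s] at hv
        have := (ih (k : Int) v).mpr ⟨k, hkl, rfl, s, hcs, hv⟩
        simp only [pvPairs, List.mem_flatMap] at this ⊢
        obtain ⟨sem, hsem, hmem⟩ := this
        exact ⟨sem, hsem, by rw [hchunk sem]; exact List.mem_append_left _ hmem⟩
      · -- the new element
        have hkeq : k = pre.length := by omega
        subst hkeq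
        have hget : (pre ++ [c]).getD pre.length "" = c := pvGetD_append_self pre c []
        rw [hget] at hcs
        simp only [pvPairs, List.mem_flatMap]
        refine ⟨s, ?_, ?_⟩
        · have : s ∈ pvSems := pvCls_mem hcs
          exact this
        · rw [hchunk s, if_pos hcs]
          apply List.mem_append_right
          simp only [List.mem_singleton]
          rw [pvNm_natCast, pvGroup_length]
          rw [pvCount_take pre c pre.length (le_refl _) s] at hv
          rw [hv]

lemma pvNodup_flatMap {α β : Type} (l : List α) (f : α → List β)
    (hn : ∀ a ∈ l, (f a).Nodup)
    (hd : l.Pairwise (fun a b => ∀ x ∈ f a, x ∉ f b)) :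
    (l.flatMap f).Nodup := by
  induction l with
  | nil => simp
  | cons a t ih =>
    rw [List.flatMap_cons, List.nodup_append]
    have hda := (List.pairwise_cons.mp hd).1
    have hdt := (List.pairwise_cons.mp hd).2
    refine ⟨hn a (by simp), ih (fun b hb => hn b (by simp [hb])) hdt, ?_⟩
    intro x hx y hy
    rcases List.mem_flatMap.mp hy with ⟨b, hb, hyb⟩
    intro hxy
    subst hxy
    exact hda b hb x hx hyb

lemma pvGroup_nodup (palette : List String) (sem : String) : (pvGroup palette sem).Nodup := by
  unfold pvGroup
  apply List.Pairwise.imp (fun {a b} (h : a < b) => ne_of_lt h)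
  rw [List.pairwise_map]
  exact (PySem.List.pairwise_lt_enumerate _ _).filter _

lemma pvMapFst_pairs (palette : List String) :
    (pvPairs palette).map Prod.fst = pvSemanticsB.flatMap (pvGroup palette) := by
  unfold pvPairs
  rw [List.map_flatMap]
  congr 1
  funext sem
  unfold pvChunk
  rw [List.map_map]
  have : (Prod.fst ∘ fun q : Int × Int => (q.2, pvNm sem q.1)) = (fun q : Int × Int => q.2) := rfl
  rw [this]
  exact PySem.List.map_snd_enumerate _ _

lemma pvKeys_nodup (palette : List String) : ((pvPairs palette).map Prod.fst).Nodup := by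
  rw [pvMapFst_pairs]
  apply pvNodup_flatMap
  · intro sem _; exact pvGroup_nodup palette sem
  · have hnd : pvSemanticsB.Pairwise (fun a b => a ≠ b) := by decide
    apply hnd.imp
    intro a b hab x hxa hxb
    obtain ⟨k, hk, rfl, hca⟩ := pvMem_group.mp hxa
    obtain ⟨k', hk', hkk, hcb⟩ := pvMem_group.mp hxb
    have : k = k' := by exact_mod_cast hkk
    subst this
    rw [hca] at hcb
    exact hab (Option.some.inj hcb)

lemma pvRank_items (palette : List String) : (pvRankF palette).items = pvPairs palette := by
  rw [pvRankF_eq_pairs_fold]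
  rw [PySem.Dict.items_foldl_insert_fresh (pvPairs palette) (fun q => q.1) (fun q => q.2)
    PySem.Dict.empty (fun a _ => by simp [PySem.Dict.contains_empty]) (pvKeys_nodup palette)]
  have h1 : (fun a : Int × String => (a.1, a.2)) = (fun a => a) := funext (fun a => rfl)
  rw [h1, List.map_id']
  rfl

lemma pvRank_keys_nodup (palette : List String) : (pvRankF palette).keys.Nodup := by
  have : (pvRankF palette).keys = (pvPairs palette).map Prod.fst := by
    simp only [PySem.Dict.keys, pvRank_items]
  rw [this]
  exact pvKeys_nodup palette

lemma pvRank_get?_some {palette : List String} {k : Nat} {s : String}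
    (hk : k < palette.length) (hcls : pvCls (palette.getD k "") = some s) :
    (pvRankF palette).get? (k : Int) = some (pvName s (pvCount palette k s + 1)) := by
  rw [PySem.Dict.get?_eq_some_iff_mem_items _ _ _ (pvRank_keys_nodup palette), pvRank_items]
  exact (pvMem_pairs palette (k : Int) _).mpr ⟨k, hk, rfl, s, hcls, rfl⟩

lemma pvRank_get?_none {palette : List String} {k : Nat}
    (hcls : pvCls (palette.getD k "") = none) :
    (pvRankF palette).get? (k : Int) = none := by
  rw [PySem.Dict.get?_eq_none_iff_not_mem_keys]
  intro hmem
  have hkeys : (pvRankF palette).keys = (pvPairs palette).map Prod.fst := by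
    simp only [PySem.Dict.keys, pvRank_items]
  rw [hkeys, pvMapFst_pairs] at hmem
  simp only [List.mem_flatMap] at hmem
  obtain ⟨sem, _, hg⟩ := hmem
  obtain ⟨k', _, hkk, hc⟩ := pvMem_group.mp hg
  have : k = k' := by exact_mod_cast hkk
  subst this
  rw [hcls] at hc
  cases hc

lemma pvCount_succ (palette : List String) (k : Nat) (hk : k < palette.length) (s : String) :
    pvCount palette (k + 1) s =
      pvCount palette k s + (if pvCls (palette.getD k "") = some s then 1 else 0) := by
  unfold pvCount
  rw [List.take_add_one, List.getElem?_eq_getElem hk]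
  simp only [Option.toList_some, List.filter_append]
  rw [List.getD_eq_getElem _ _ hk]
  by_cases h : pvCls palette[k] = some s
  · simp [h]
  · have : (pvCls palette[k] == some s) = false := by simp [h]
    simp [this, h]

lemma pvPass3_go (palette : List String) : ∀ (t pre : List String)
    (d : PySem.Dict String String), palette = pre ++ t →
    (PySem.List.enumerate t (pre.length : Int)).foldl (pvStep3 (pvRankF palette)) d
      = pvSpecGo t (fun s => pvCount palette pre.length s) d := by
  intro t
  induction t with
  | nil => intro pre d _; rfl
  | cons c t ih =>
    intro pre d hsplit
    rw [PySem.List.enumerate_cons, List.foldl_cons]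
    have hm : pre.length < palette.length := by subst hsplit; simp
    have hget : palette.getD pre.length "" = c := by
      subst hsplit
      exact pvGetD_append_self pre c t
    have hstep1 : ∀ s, pvCount palette (pre.length + 1) s =
        pvCount palette pre.length s + (if pvCls c = some s then 1 else 0) := by
      intro s
      rw [pvCount_succ palette pre.length hm s, hget]
    have hsplit' : palette = (pre ++ [c]) ++ t := by rw [hsplit]; simp
    have hih := ih (pre ++ [c]) (pvStep3 (pvRankF palette) d ((pre.length : Int), c)) hsplit'
    have hlen : ((pre ++ [c]).length : Int) = (pre.length : Int) + 1 := by simp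
    have hlenN : (pre ++ [c]).length = pre.length + 1 := by simp
    rw [hlen, hlenN] at hih
    rw [hih]
    by_cases hw : c = "white"
    · subst hw
      rw [pvSpecGo_none pvCls_white, if_pos rfl]
      have hs3 : pvStep3 (pvRankF palette) d ((pre.length : Int), "white")
          = d.insert "white" "background" := by
        simp [pvStep3]
      rw [hs3]
      congr 1
      funext s
      rw [hstep1 s, pvCls_white]
      simp
    · by_cases hb : c = "black"
      · subst hb
        rw [pvSpecGo_none pvCls_black, if_neg hw, if_pos rfl]
        have hs3 : pvStep3 (pvRankF palette) d ((pre.length : Int), "black")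
            = d.insert "black" "foreground" := by
          simp [pvStep3]
        rw [hs3]
        congr 1
        funext s
        rw [hstep1 s, pvCls_black]
        simp
      · rcases hcls : pvCls c with _ | s
        · have hs3 : pvStep3 (pvRankF palette) d ((pre.length : Int), c) = d := by
            simp only [pvStep3]
            rw [if_neg (by simp [hw]), if_neg (by simp [hb])]
            rw [pvRank_get?_none (by rw [hget]; exact hcls)]
          rw [hs3, pvSpecGo_none hcls, if_neg hw, if_neg hb]
          congr 1
          funext s
          rw [hstep1 s, hcls]
          simp
        · have hs3 : pvStep3 (pvRankF palette) d ((pre.length : Int), c)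
              = d.insert c (pvName s (pvCount palette pre.length s + 1)) := by
            simp only [pvStep3]
            rw [if_neg (by simp [hw]), if_neg (by simp [hb])]
            rw [pvRank_get?_some hm (by rw [hget]; exact hcls)]
          rw [hs3, pvSpecGo_some hcls]
          congr 1
          funext x
          rw [hstep1 x, hcls]
          unfold pvBump
          by_cases hx : x = s
          · subst hx; simp
          · have hsx : ¬ s = x := fun h' => hx h'.symm
            simp [hx, hsx]

lemma pvB_eq (palette : List String) : infer_semantic_names_py_alt palette =
    (pvSpecGo palette (fun _ => 0) PySem.Dict.empty).items := by
  rw [pvAlt_eq]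
  have h := pvPass3_go palette palette [] PySem.Dict.empty (by simp)
  simp only [List.length_nil, Nat.cast_zero] at h
  have hz : (fun s => pvCount palette 0 s) = (fun _ : String => 0) := by
    funext s; rfl
  rw [hz] at h
  rw [h]

-- ===== VERDICT (by name: the statement is the Claim_ definition above) =====
theorem infer_semantic_names_py_spec : Claim_equal_infer_semantic_names_py := by
  intro palette _
  show infer_semantic_names_py palette = infer_semantic_names_py_alt palette
  rw [pvB_eq]
  unfold infer_semantic_names_py
  rw [pvA_go palette (fun _ => 0) PySem.Set.empty PySem.Dict.empty pvInv_nil]
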